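-- pv_equiv track=rewrite | github.com/SaarShai/Primes-Equispaced | experiments/hristov_word_conversion.py | word_to_matrix
-- ===== SOURCE A (Python) =====
-- def word_to_matrix(word):
--     """Map free-group word to Gamma(2) matrix in SL(2,Z).
--     Uses pure Python ints for arbitrary precision (avoids int64 overflow)."""
--     # Pure Python arbitrary-precision integer arithmetic
--     GENS_PY = {
--         'a': ((1, 2), (0, 1)),
--         'A': ((1, -2), (0, 1)),
--         'b': ((1, 0), (2, 1)),
--         'B': ((1, 0), (-2, 1)),
--     }
--     a, b, c, d = 1, 0, 0, 1  # Identity matrix [[a,b],[c,d]]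
--     for letter in word:
--         g = GENS_PY[letter]
--         ga, gb, gc, gd = g[0][0], g[0][1], g[1][0], g[1][1]
--         a, b, c, d = (a*ga + b*gc, a*gb + b*gd,
--                       c*ga + d*gc, c*gb + d*gd)
--     return (a, b, c, d)  # Return as tuple of Python ints
-- ===== SOURCE B (Python) =====
-- def word_to_matrix(word):
--     """Map free-group word to Gamma(2) matrix in SL(2,Z).
--     Groups maximal runs of the same letter and multiplies in the closed-form
--     k-th power of each generator (a^k = [[1,2k],[0,1]], etc.)."""
--     a, b, c, d = 1, 0, 0, 1
--     i, n = 0, len(word)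
--     while i < n:
--         l = word[i]
--         j = i
--         while j < n and word[j] == l:
--             j += 1
--         k = j - i
--         if l == 'a':
--             m00, m01, m10, m11 = 1, 2 * k, 0, 1
--         elif l == 'A':
--             m00, m01, m10, m11 = 1, -2 * k, 0, 1
--         elif l == 'b':
--             m00, m01, m10, m11 = 1, 0, 2 * k, 1
--         elif l == 'B':
--             m00, m01, m10, m11 = 1, 0, -2 * k, 1
--         else:
--             raise KeyError(l)
--         a, b, c, d = (a * m00 + b * m10, a * m01 + b * m11,
--                       c * m00 + d * m10, c * m01 + d * m11)
--         i = j
--     return (a, b, c, d)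
-- ===== Notes on version B (the rewrite author's own statement) =====
-- stated objective: alternative
-- what changed: B groups the word into maximal runs of equal letters and multiplies one closed-form k-th power block per run instead of one generator matrix per letter.
import Mathlib
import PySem

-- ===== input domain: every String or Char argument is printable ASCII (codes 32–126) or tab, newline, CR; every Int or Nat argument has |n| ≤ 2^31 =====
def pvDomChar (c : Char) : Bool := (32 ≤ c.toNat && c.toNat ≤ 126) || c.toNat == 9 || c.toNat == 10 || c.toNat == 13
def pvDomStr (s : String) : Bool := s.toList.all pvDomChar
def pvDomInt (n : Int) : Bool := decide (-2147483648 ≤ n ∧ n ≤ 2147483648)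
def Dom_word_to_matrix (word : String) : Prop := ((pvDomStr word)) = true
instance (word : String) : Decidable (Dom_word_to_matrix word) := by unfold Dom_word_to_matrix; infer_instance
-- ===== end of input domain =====

-- B groups the word into maximal runs of equal letters and multiplies one
-- closed-form k-th power block per run (alternative algorithm, same cost class).


-- ===== PORT A =====
-- A's GENS_PY dict
def GENS_PY : PySem.Dict Char ((Int × Int) × (Int × Int)) :=
  PySem.Dict.ofList [('a', ((1, 2), (0, 1))), ('A', ((1, -2), (0, 1))),
                     ('b', ((1, 0), (2, 1))), ('B', ((1, 0), (-2, 1)))]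

-- the loop body of A; the .getD identity covers the KeyError case, excluded by Pre_
def stepA (s : Int × Int × Int × Int) (letter : Char) : Int × Int × Int × Int :=
  let g := (GENS_PY.get? letter).getD ((1, 0), (0, 1))
  let ga := g.1.1; let gb := g.1.2; let gc := g.2.1; let gd := g.2.2
  (s.1 * ga + s.2.1 * gc, s.1 * gb + s.2.1 * gd,
   s.2.2.1 * ga + s.2.2.2 * gc, s.2.2.1 * gb + s.2.2.2 * gd)

def word_to_matrix (word : String) : Int × Int × Int × Int :=
  word.toList.foldl stepA (1, 0, 0, 1)

-- ===== PORT B =====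
-- closed-form k-th power of a generator; identity on the KeyError letters, excluded by Pre_
def blockB (l : Char) (k : Int) : Int × Int × Int × Int :=
  if l = 'a' then (1, 2 * k, 0, 1)
  else if l = 'A' then (1, -2 * k, 0, 1)
  else if l = 'b' then (1, 0, 2 * k, 1)
  else if l = 'B' then (1, 0, -2 * k, 1)
  else (1, 0, 0, 1)

def mul4 (s g : Int × Int × Int × Int) : Int × Int × Int × Int :=
  (s.1 * g.1 + s.2.1 * g.2.2.1, s.1 * g.2.1 + s.2.1 * g.2.2.2,
   s.2.2.1 * g.1 + s.2.2.2 * g.2.2.1, s.2.2.1 * g.2.1 + s.2.2.2 * g.2.2.2)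

-- B's outer while loop: consume one maximal run per step
def goB (acc : Int × Int × Int × Int) : List Char → Int × Int × Int × Int
  | [] => acc
  | l :: rest =>
    let p := rest.span (fun c => c == l)
    goB (mul4 acc (blockB l ((p.1.length : Int) + 1))) p.2
termination_by xs => xs.length
decreasing_by
  simp only [List.span_eq_takeWhile_dropWhile, List.length_cons]
  exact Nat.lt_succ_of_le (List.length_dropWhile_le _ _)

def word_to_matrix_alt (word : String) : Int × Int × Int × Int :=
  goB (1, 0, 0, 1) word.toList

-- ===== PRECONDITION & SPEC =====
-- A raises KeyError on any letter outside {a,A,b,B}; Pre_ excludes exactly those words.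
def Pre_word_to_matrix (word : String) : Prop :=
  (word.toList.all (fun c => c == 'a' || c == 'A' || c == 'b' || c == 'B')) = true
instance (word : String) : Decidable (Pre_word_to_matrix word) := by
  unfold Pre_word_to_matrix; infer_instance

def pvWitness_word_to_matrix : String := "ab"

def Spec_word_to_matrix (word : String) (out : Int × Int × Int × Int) : Prop := out = word_to_matrix_alt word
instance (word : String) (out : Int × Int × Int × Int) : Decidable (Spec_word_to_matrix word out) := by unfold Spec_word_to_matrix; infer_instance

-- ===== CLAIM (what is proved, stated in full; the proofs are below) =====
def Claim_equal_word_to_matrix : Prop := ∀ (word : String), Dom_word_to_matrix word → Pre_word_to_matrix word → Spec_word_to_matrix word (word_to_matrix word)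

-- ===== LEMMAS AND PROOFS =====

def isGen (c : Char) : Prop := c = 'a' ∨ c = 'A' ∨ c = 'b' ∨ c = 'B'

-- single step of A is multiplication by the 1st power block
theorem stepA_eq_mul (s : Int × Int × Int × Int) (l : Char) (h : isGen l) :
    stepA s l = mul4 s (blockB l 1) := by
  obtain ⟨a, b, c, d⟩ := s
  rcases h with h | h | h | h <;> subst h <;>
    simp [stepA, mul4, blockB,
      show GENS_PY.get? 'a' = some ((1, 2), (0, 1)) from by decide,
      show GENS_PY.get? 'A' = some ((1, -2), (0, 1)) from by decide,
      show GENS_PY.get? 'b' = some ((1, 0), (2, 1)) from by decide,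
      show GENS_PY.get? 'B' = some ((1, 0), (-2, 1)) from by decide]

theorem mul4_one (s : Int × Int × Int × Int) : mul4 s (1, 0, 0, 1) = s := by
  obtain ⟨a, b, c, d⟩ := s; simp [mul4]

theorem blockB_zero (l : Char) : blockB l 0 = (1, 0, 0, 1) := by
  unfold blockB; split_ifs <;> norm_num

theorem blockB_succ (l : Char) (k : Int) :
    mul4 (blockB l k) (blockB l 1) = blockB l (k + 1) := by
  unfold blockB; split_ifs <;> simp [mul4] <;> ring

theorem mul4_assoc (x y z : Int × Int × Int × Int) :
    mul4 (mul4 x y) z = mul4 x (mul4 y z) := by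
  obtain ⟨a, b, c, d⟩ := x; obtain ⟨e, f, g, h⟩ := y; obtain ⟨i, j, k, m⟩ := z
  simp only [mul4]; refine Prod.ext ?_ (Prod.ext ?_ (Prod.ext ?_ ?_)) <;> ring

theorem foldl_replicate (l : Char) (hg : isGen l) (k : Nat) (acc : Int × Int × Int × Int) :
    (List.replicate k l).foldl stepA acc = mul4 acc (blockB l (k : Int)) := by
  induction k generalizing acc with
  | zero => simp [blockB_zero, mul4_one]
  | succ n ih =>
    rw [List.replicate_succ', List.foldl_append, ih, List.foldl_cons, List.foldl_nil,
      stepA_eq_mul _ _ hg, mul4_assoc, blockB_succ]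
    push_cast
    ring_nf

theorem goB_eq_foldl : ∀ (lst : List Char), (∀ c ∈ lst, isGen c) →
    ∀ acc, goB acc lst = lst.foldl stepA acc
  | [], _, acc => by simp [goB]
  | l :: rest, hg, acc => by
    rw [goB]
    simp only [List.span_eq_takeWhile_dropWhile]
    have hrest : rest.takeWhile (fun c => c == l) ++ rest.dropWhile (fun c => c == l) = rest :=
      List.takeWhile_append_dropWhile
    have htall : ∀ x ∈ rest.takeWhile (fun c => c == l), x = l := fun x hx =>
      eq_of_beq (List.mem_takeWhile_imp (p := fun c => c == l) hx)
    have hrepl : l :: rest.takeWhile (fun c => c == l) =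
        List.replicate ((rest.takeWhile (fun c => c == l)).length + 1) l := by
      rw [List.eq_replicate_iff]
      constructor
      · simp [Nat.add_comm]
      · intro b hb
        rcases List.mem_cons.mp hb with h | h
        · exact h
        · exact htall b h
    have hsub : ∀ c ∈ rest.dropWhile (fun c => c == l), isGen c := fun c hc =>
      hg c (List.mem_cons_of_mem _ ((List.dropWhile_sublist _).subset hc))
    rw [goB_eq_foldl _ hsub]
    conv_rhs => rw [← hrest, ← List.cons_append, List.foldl_append, hrepl,
      foldl_replicate l (hg l List.mem_cons_self) _ acc]
    push_cast
    ring_nf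
termination_by lst => lst.length
decreasing_by
  exact Nat.lt_succ_of_le (List.length_dropWhile_le _ _)

-- ===== VERDICT (by name: the statement is the Claim_ definition above) =====
theorem word_to_matrix_spec : Claim_equal_word_to_matrix := by
  intro word _ hpre
  have hg : ∀ c ∈ word.toList, isGen c := by
    intro c hc
    have := List.all_eq_true.mp hpre c hc
    simp only [Bool.or_eq_true, beq_iff_eq] at this
    unfold isGen
    tauto
  unfold Spec_word_to_matrix word_to_matrix word_to_matrix_alt
  exact (goB_eq_foldl word.toList hg (1, 0, 0, 1)).symm
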